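-- pv_equiv track=rewrite | github.com/luisfls95/News-Collection-Website---Primeiro-Jornal | py-teste-servidor/main.py | splitStringToArray
-- ===== SOURCE A (Python) =====
-- def splitStringToArray(string):
--     #esta função recebe uma string de links e devolve um array de links
--
--     link_array = []
--     new_string = ''
--     in_link = True
--     for char in string:
--         if char != " " and in_link == True:
--             new_string = new_string + char
--         elif char == " ":
--             in_link = False
--             link_array.append(new_string)
--             new_string = ''
--         elif char == 'h' and in_link == False:
--             in_link = True
--             new_string = new_string + char
--     return link_array
-- ===== SOURCE B (Python) =====
-- def splitStringToArray(string):
--     # tokenize on ' ' then slice each later segment from its first 'h'; the trailing segment is never emitted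
--     out = []
--     segments = string.split(' ')
--     for i, seg in enumerate(segments[:-1]):
--         if i == 0:
--             out.append(seg)
--         else:
--             idx = seg.find('h')
--             out.append(seg[idx:] if idx != -1 else '')
--     return out
-- ===== Notes on version B (the rewrite author's own statement) =====
-- stated objective: simpler
-- what changed: B replaces A's char-by-char state machine (in_link flag, manual accumulator) with a tokenize-then-slice pass: split on the space separator, drop the trailing segment, keep the first segment as is and slice each later segment from its first 'h' (empty string if none).
import Mathlib
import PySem

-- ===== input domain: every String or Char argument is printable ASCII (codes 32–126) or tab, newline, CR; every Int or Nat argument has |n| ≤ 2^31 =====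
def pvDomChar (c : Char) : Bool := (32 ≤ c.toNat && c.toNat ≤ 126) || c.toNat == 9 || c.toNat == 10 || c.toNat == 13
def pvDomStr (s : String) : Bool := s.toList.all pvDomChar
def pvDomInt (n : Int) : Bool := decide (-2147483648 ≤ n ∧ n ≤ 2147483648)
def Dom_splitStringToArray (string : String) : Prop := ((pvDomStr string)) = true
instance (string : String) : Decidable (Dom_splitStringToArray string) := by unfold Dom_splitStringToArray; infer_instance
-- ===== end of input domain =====

-- B replaces A's char-by-char state machine with a tokenize-then-slice pass over the space-split segments
-- (objective: simpler decomposition; a timing run measured B faster by a constant factor).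

-- ===== PORT A =====
-- state = (link_array, new_string, in_link); strings handled as List Char, turned into String at the end
def splitStringToArrayStep (st : List (List Char) × List Char × Bool) (c : Char) :
    List (List Char) × List Char × Bool :=
  if c ≠ ' ' ∧ st.2.2 = true then (st.1, st.2.1 ++ [c], st.2.2)
  else if c = ' ' then (st.1 ++ [st.2.1], [], false)
  else if c = 'h' ∧ st.2.2 = false then (st.1, st.2.1 ++ [c], true)
  else st

def splitStringToArray (string : String) : List String :=
  ((string.toList.foldl splitStringToArrayStep ([], [], true)).1).map (fun l => String.mk l)

-- ===== PORT B =====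
def splitStringToArray_alt (string : String) : List String :=
  let segments := PySem.Chars.splitOn string.toList [' ']
  let body := PySem.List.slice segments none (some (-1))    -- segments[:-1]
  ((PySem.List.enumerate body).foldl (fun out (p : Int × List Char) =>
      if p.1 = 0 then out ++ [p.2]
      else
        let idx := PySem.Chars.find p.2 ['h']
        if idx ≠ -1 then out ++ [PySem.Chars.slice p.2 (some idx) none] else out ++ [[]]) []).map
    (fun l => String.mk l)

-- ===== PRECONDITION & SPEC =====
def Spec_splitStringToArray (string : String) (out : List String) : Prop := out = splitStringToArray_alt string
instance (string : String) (out : List String) : Decidable (Spec_splitStringToArray string out) := by unfold Spec_splitStringToArray; infer_instance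

-- ===== CLAIM (what is proved, stated in full; the proofs are below) =====
def Claim_equal_splitStringToArray : Prop := ∀ (string : String), Dom_splitStringToArray string → Spec_splitStringToArray string (splitStringToArray string)

-- ===== LEMMAS AND PROOFS =====

-- sep-split of a char list, current segment accumulated left-to-right
def splitSp : List Char → List Char → List (List Char)
  | [], ns => [ns]
  | c :: r, ns => if c = ' ' then ns :: splitSp r [] else splitSp r (ns ++ [c])

-- what A's state machine emits from a given state
def emitA : Bool → List Char → List Char → List (List Char)
  | _, _, [] => []
  | true, ns, c :: r => if c = ' ' then ns :: emitA false [] r else emitA true (ns ++ [c]) r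
  | false, ns, c :: r =>
      if c = ' ' then ns :: emitA false [] r
      else if c = 'h' then emitA true (ns ++ [c]) r else emitA false ns r

-- B's per-later-segment transformation
def hsl (seg : List Char) : List Char :=
  let idx := PySem.Chars.find seg ['h']
  if idx ≠ -1 then PySem.Chars.slice seg (some idx) none else []

-- B's view of a segment list
def bview (segs : List (List Char)) : List (List Char) :=
  match segs.dropLast with
  | [] => []
  | s0 :: rest => s0 :: rest.map hsl

theorem splitSp_ne_nil (l ns : List Char) : splitSp l ns ≠ [] := by
  induction l generalizing ns with
  | nil => simp [splitSp]
  | cons c r ih => by_cases h : c = ' ' <;> simp [splitSp, h, ih]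

theorem go_eq_splitSp (fuel : Nat) :
    ∀ (l cur : List Char) (accs : List (List Char)), l.length < fuel →
      PySem.Chars.splitOn.go [' '] fuel l cur accs = accs.reverse ++ splitSp l cur.reverse := by
  induction fuel with
  | zero => intro l cur accs h; omega
  | succ fuel ih =>
    intro l cur accs h
    cases l with
    | nil => simp [PySem.Chars.splitOn.go, splitSp]
    | cons c r =>
      by_cases hc : c = ' '
      · subst hc
        have hpf : [' '].isPrefixOf (' ' :: r) = true := by simp [List.isPrefixOf]
        simp only [PySem.Chars.splitOn.go, hpf, if_pos]
        have hdr : List.drop [' '].length (' ' :: r) = r := rfl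
        rw [hdr, ih r [] (cur.reverse :: accs) (by simp at h ⊢; omega)]
        simp [splitSp]
      · have hpf : [' '].isPrefixOf (c :: r) = false := by
          simp [List.isPrefixOf]; exact fun hx => (hc hx.symm).elim
        simp only [PySem.Chars.splitOn.go, hpf]
        rw [ih r (c :: cur) accs (by simp at h ⊢; omega)]
        simp [splitSp, hc]

theorem splitOn_eq_splitSp (cs : List Char) :
    PySem.Chars.splitOn cs [' '] = splitSp cs [] := by
  have := go_eq_splitSp (cs.length + 1) cs [] [] (by omega)
  simpa [PySem.Chars.splitOn] using this

theorem singleton_prefix_iff {a : Char} {l : List Char} : [a] <+: l ↔ l.head? = some a := by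
  cases l with
  | nil => simp
  | cons x t =>
    constructor
    · rintro ⟨s, hs⟩; simp at hs; simp [hs.1]
    · intro hx; simp at hx; exact ⟨t, by simp [hx]⟩

theorem find_h_eq_neg_one {pre : List Char} (hp : 'h' ∉ pre) :
    PySem.Chars.find pre ['h'] = -1 := by
  rw [PySem.Chars.find_eq_neg_one_iff]
  intro hinf
  exact hp (by simpa using hinf.subset (by simp))

theorem hsl_no_h {pre : List Char} (hp : 'h' ∉ pre) : hsl pre = [] := by
  simp [hsl, find_h_eq_neg_one hp]

theorem hsl_pre_h {pre ns : List Char} (hp : 'h' ∉ pre) (hns : ns.head? = some 'h') :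
    hsl (pre ++ ns) = ns := by
  have hmem : 'h' ∈ pre ++ ns := by
    cases ns with
    | nil => simp at hns
    | cons x t => simp at hns; simp [hns]
  have hinf : ['h'] <:+: pre ++ ns := by
    obtain ⟨l1, l2, h12⟩ := List.append_of_mem hmem
    exact ⟨l1, l2, by simp [h12]⟩
  have h0 : 0 ≤ PySem.Chars.find (pre ++ ns) ['h'] :=
    (PySem.Chars.find_nonneg_iff _ _).mpr hinf
  obtain ⟨hpref, hmin⟩ := PySem.Chars.find_spec h0
  set f := PySem.Chars.find (pre ++ ns) ['h'] with hf
  have hle : f.toNat ≤ pre.length := by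
    by_contra hlt
    have hlt' : pre.length < f.toNat := by omega
    have hP : ['h'] <+: (pre ++ ns).drop pre.length := by
      have hdl : (pre ++ ns).drop pre.length = ns := by simp
      rw [hdl]; exact singleton_prefix_iff.mpr hns
    exact hmin pre.length hlt' hP
  have hge : pre.length ≤ f.toNat := by
    by_contra hlt
    have hlt' : f.toNat < pre.length := by omega
    have hdrop : (pre ++ ns).drop f.toNat = pre.drop f.toNat ++ ns := by
      rw [List.drop_append_of_le_length (by omega)]
    have hpref' : ['h'] <+: pre.drop f.toNat ++ ns := by rw [← hdrop]; exact hpref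
    have hhead := singleton_prefix_iff.mp hpref'
    cases hyp : pre.drop f.toNat with
    | nil =>
      rw [List.drop_eq_nil_iff] at hyp; omega
    | cons y t =>
      rw [hyp] at hhead; simp at hhead
      have hy : y ∈ pre := by
        have hy' : y ∈ pre.drop f.toNat := by simp [hyp]
        exact List.mem_of_mem_drop hy'
      rw [hhead] at hy; exact hp hy
  have hfeq : f = (pre.length : Int) := by omega
  simp only [hsl]
  rw [← hf, hfeq]
  rw [if_pos (by omega)]
  rw [PySem.Chars.slice_eq_listSlice, PySem.List.slice_from_natCast]
  simp

theorem step_space (arr : List (List Char)) (ns : List Char) (inl : Bool) :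
    splitStringToArrayStep (arr, ns, inl) ' ' = (arr ++ [ns], [], false) := by
  cases inl <;> simp [splitStringToArrayStep]

theorem step_true (arr : List (List Char)) (ns : List Char) (c : Char) (hc : c ≠ ' ') :
    splitStringToArrayStep (arr, ns, true) c = (arr, ns ++ [c], true) := by
  simp [splitStringToArrayStep, hc]

theorem step_false_h (arr : List (List Char)) (ns : List Char) :
    splitStringToArrayStep (arr, ns, false) 'h' = (arr, ns ++ ['h'], true) := by
  simp [splitStringToArrayStep]

theorem step_false (arr : List (List Char)) (ns : List Char) (c : Char)
    (hc : c ≠ ' ') (hh : c ≠ 'h') :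
    splitStringToArrayStep (arr, ns, false) c = (arr, ns, false) := by
  simp [splitStringToArrayStep, hc, hh]

theorem foldA_eq_emitA (cs : List Char) :
    ∀ (arr : List (List Char)) (ns : List Char) (inl : Bool),
      (cs.foldl splitStringToArrayStep (arr, ns, inl)).1 = arr ++ emitA inl ns cs := by
  induction cs with
  | nil => intro arr ns inl; cases inl <;> simp [emitA]
  | cons c r ih =>
    intro arr ns inl
    cases inl with
    | true =>
      by_cases hc : c = ' '
      · subst hc
        rw [List.foldl_cons, step_space, ih (arr ++ [ns]) [] false]
        simp [emitA]
      · rw [List.foldl_cons, step_true arr ns c hc, ih arr (ns ++ [c]) true]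
        simp [emitA, hc]
    | false =>
      by_cases hc : c = ' '
      · subst hc
        rw [List.foldl_cons, step_space, ih (arr ++ [ns]) [] false]
        simp [emitA]
      · by_cases hh : c = 'h'
        · subst hh
          rw [List.foldl_cons, step_false_h, ih arr (ns ++ ['h']) true]
          simp [emitA, hc]
        · rw [List.foldl_cons, step_false arr ns c hc hh, ih arr ns false]
          simp [emitA, hc, hh]

theorem emit_both (n : Nat) :
    ∀ (cs : List Char), cs.length ≤ n →
      ((∀ pre : List Char, 'h' ∉ pre →
          emitA false [] cs = ((splitSp cs pre).dropLast).map hsl) ∧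
       (∀ pre ns : List Char, 'h' ∉ pre → ns.head? = some 'h' →
          emitA true ns cs = ((splitSp cs (pre ++ ns)).dropLast).map hsl)) := by
  induction n with
  | zero =>
    intro cs hlen
    have hnil : cs = [] := List.eq_nil_of_length_eq_zero (by omega)
    subst hnil
    exact ⟨fun pre _ => by simp [emitA, splitSp], fun pre ns _ _ => by simp [emitA, splitSp]⟩
  | succ n ih =>
    intro cs hlen
    cases cs with
    | nil =>
      exact ⟨fun pre _ => by simp [emitA, splitSp], fun pre ns _ _ => by simp [emitA, splitSp]⟩
    | cons c r =>
      have hr : r.length ≤ n := by simp at hlen; omega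
      constructor
      · intro pre hp
        by_cases hc : c = ' '
        · subst hc
          have e1 : emitA false [] (' ' :: r) = [] :: emitA false [] r := by simp [emitA]
          have e2 : splitSp (' ' :: r) pre = pre :: splitSp r [] := by simp [splitSp]
          rw [e1, e2, List.dropLast_cons_of_ne_nil (splitSp_ne_nil r [])]
          simp [hsl_no_h hp, (ih r hr).1 [] (by simp)]
        · by_cases hh : c = 'h'
          · subst hh
            have e1 : emitA false [] ('h' :: r) = emitA true ['h'] r := by simp [emitA]
            have e2 : splitSp ('h' :: r) pre = splitSp r (pre ++ ['h']) := by simp [splitSp]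
            rw [e1, e2]
            exact (ih r hr).2 pre ['h'] hp (by simp)
          · have e1 : emitA false [] (c :: r) = emitA false [] r := by simp [emitA, hc, hh]
            have e2 : splitSp (c :: r) pre = splitSp r (pre ++ [c]) := by simp [splitSp, hc]
            rw [e1, e2]
            exact (ih r hr).1 (pre ++ [c]) (by simp [hp]; exact fun hx => hh hx.symm)
      · intro pre ns hp hns
        by_cases hc : c = ' '
        · subst hc
          have e1 : emitA true ns (' ' :: r) = ns :: emitA false [] r := by simp [emitA]
          have e2 : splitSp (' ' :: r) (pre ++ ns) = (pre ++ ns) :: splitSp r [] := by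
            simp [splitSp]
          rw [e1, e2, List.dropLast_cons_of_ne_nil (splitSp_ne_nil r [])]
          simp [hsl_pre_h hp hns, (ih r hr).1 [] (by simp)]
        · have e1 : emitA true ns (c :: r) = emitA true (ns ++ [c]) r := by simp [emitA, hc]
          have e2 : splitSp (c :: r) (pre ++ ns) = splitSp r (pre ++ (ns ++ [c])) := by
            simp [splitSp, hc]
          rw [e1, e2]
          exact (ih r hr).2 pre (ns ++ [c]) hp
            (by cases ns with | nil => simp at hns | cons x t => simpa using hns)

theorem emitA_true_eq (cs : List Char) :
    ∀ (ns : List Char), emitA true ns cs = bview (splitSp cs ns) := by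
  induction cs with
  | nil => intro ns; simp [emitA, splitSp, bview]
  | cons c r ih =>
    intro ns
    by_cases hc : c = ' '
    · subst hc
      have e1 : emitA true ns (' ' :: r) = ns :: emitA false [] r := by simp [emitA]
      have e2 : splitSp (' ' :: r) ns = ns :: splitSp r [] := by simp [splitSp]
      rw [e1, e2]
      unfold bview
      rw [List.dropLast_cons_of_ne_nil (splitSp_ne_nil r [])]
      simp [(emit_both r.length r le_rfl).1 [] (by simp)]
    · have e1 : emitA true ns (c :: r) = emitA true (ns ++ [c]) r := by simp [emitA, hc]
      have e2 : splitSp (c :: r) ns = splitSp r (ns ++ [c]) := by simp [splitSp, hc]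
      rw [e1, e2]
      exact ih (ns ++ [c])

theorem foldB_tail (rest : List (List Char)) :
    ∀ (out : List (List Char)) (k : Int), 1 ≤ k →
      ((PySem.List.enumerate rest k).foldl (fun out (p : Int × List Char) =>
        if p.1 = 0 then out ++ [p.2]
        else
          if PySem.Chars.find p.2 ['h'] ≠ -1 then
            out ++ [PySem.Chars.slice p.2 (some (PySem.Chars.find p.2 ['h'])) none]
          else out ++ [[]]) out)
        = out ++ rest.map hsl := by
  induction rest with
  | nil => intro out k _; simp [PySem.List.enumerate]
  | cons s t ih =>
    intro out k hk
    rw [PySem.List.enumerate_cons, List.foldl_cons]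
    simp only
    rw [if_neg (by omega)]
    by_cases hf : PySem.Chars.find s ['h'] ≠ -1
    · rw [if_pos hf, ih (out ++ [PySem.Chars.slice s (some (PySem.Chars.find s ['h'])) none]) (k + 1) (by omega)]
      simp [hsl, hf]
    · rw [if_neg hf, ih (out ++ [[]]) (k + 1) (by omega)]
      simp [hsl, hf]

theorem altCore_eq_bview (cs : List Char) :
    ((PySem.List.enumerate (PySem.List.slice (PySem.Chars.splitOn cs [' ']) none (some (-1)))).foldl
      (fun out (p : Int × List Char) =>
        if p.1 = 0 then out ++ [p.2]
        else
          if PySem.Chars.find p.2 ['h'] ≠ -1 then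
            out ++ [PySem.Chars.slice p.2 (some (PySem.Chars.find p.2 ['h'])) none]
          else out ++ [[]]) [])
      = bview (splitSp cs []) := by
  rw [splitOn_eq_splitSp, PySem.List.slice_to_neg_one]
  cases hb : (splitSp cs []).dropLast with
  | nil => simp [PySem.List.enumerate, bview, hb]
  | cons s0 rest =>
    rw [PySem.List.enumerate_cons, List.foldl_cons]
    simp only
    rw [if_pos trivial]
    rw [show (0 : Int) + 1 = 1 from rfl]
    rw [foldB_tail rest ([] ++ [s0]) 1 (by omega)]
    simp [bview, hb]

-- ===== VERDICT (by name: the statement is the Claim_ definition above) =====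
theorem splitStringToArray_spec : Claim_equal_splitStringToArray := by
  intro string _
  unfold Spec_splitStringToArray splitStringToArray splitStringToArray_alt
  simp only
  rw [altCore_eq_bview string.toList]
  rw [foldA_eq_emitA string.toList [] [] true]
  rw [emitA_true_eq string.toList []]
  simp
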